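-- pv_equiv track=rewrite | github.com/MattCat-exe/Python_Practice | problem_set_07.py | sort_candy
-- ===== SOURCE A (Python) =====
-- def sort_candy(candy_list):
--     '''
--     Uses the types dict to sort the candies in the candy_list by type
--
--     Parameters:
--         candy_list(list): a list of strings, each respresenting a different candy
--
--     Returns:
--         dict: types
--     '''
--     #Setup
--     types = {
--         'chocolate' : [],
--         'fruit' : [],
--         'other' : []
--     }
--     #End Setup
--     for candy in candy_list:
--         if candy == "hershey bar":
--             types['chocolate'].append(candy)
--         if candy == "snickers":
--             types['chocolate'].append(candy)
--         if candy == "skittles":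
--             types['fruit'].append(candy)
--         if candy == "starburst":
--             types['fruit'].append(candy)
--         if candy == "tootsie roll":
--             types['other'].append(candy)
--         if candy == 'candy corn':
--             types['other'].append(candy)
--     return types
-- ===== SOURCE B (Python) =====
-- CATEGORIES = {
--     'chocolate': {'hershey bar', 'snickers'},
--     'fruit': {'skittles', 'starburst'},
--     'other': {'tootsie roll', 'candy corn'},
-- }
--
-- def sort_candy(candy_list):
--     return {cat: [c for c in candy_list if c in names]
--             for cat, names in CATEGORIES.items()}
-- ===== Notes on version B (the rewrite author's own statement) =====
-- stated objective: simpler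
-- what changed: Replaces A's per-item six-way if-dispatch with appends into a pre-built dict by a category->name-set table and one filtering comprehension per category (group-by-category instead of per-item dispatch).
import Mathlib
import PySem

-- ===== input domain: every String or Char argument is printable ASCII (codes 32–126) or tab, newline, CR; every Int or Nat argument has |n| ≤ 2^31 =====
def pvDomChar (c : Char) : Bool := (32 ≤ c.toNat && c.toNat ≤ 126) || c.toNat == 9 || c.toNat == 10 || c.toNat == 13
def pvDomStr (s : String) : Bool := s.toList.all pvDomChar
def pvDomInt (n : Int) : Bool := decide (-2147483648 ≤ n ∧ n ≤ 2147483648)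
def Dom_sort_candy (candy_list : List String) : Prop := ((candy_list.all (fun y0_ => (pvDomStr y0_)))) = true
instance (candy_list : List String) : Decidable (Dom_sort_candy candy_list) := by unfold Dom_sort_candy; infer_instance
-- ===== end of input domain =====

-- B replaces A's per-item six-way if-dispatch with a category→name-set table and one filter per category (simpler decomposition; same cost).

-- ===== PORT A =====
def sort_candy (candy_list : List String) : List (String × List String) :=
  let types : PySem.Dict String (List String) :=
    ((PySem.Dict.empty.insert "chocolate" []).insert "fruit" []).insert "other" []
  let types := candy_list.foldl (fun d candy =>
    let d := if candy == "hershey bar" then d.modify "chocolate" [] (· ++ [candy]) else d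
    let d := if candy == "snickers" then d.modify "chocolate" [] (· ++ [candy]) else d
    let d := if candy == "skittles" then d.modify "fruit" [] (· ++ [candy]) else d
    let d := if candy == "starburst" then d.modify "fruit" [] (· ++ [candy]) else d
    let d := if candy == "tootsie roll" then d.modify "other" [] (· ++ [candy]) else d
    let d := if candy == "candy corn" then d.modify "other" [] (· ++ [candy]) else d
    d) types
  types.items

-- ===== PORT B =====
def pvCategories : List (String × PySem.Set String) :=
  [("chocolate", PySem.Set.ofList ["hershey bar", "snickers"]),
   ("fruit", PySem.Set.ofList ["skittles", "starburst"]),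
   ("other", PySem.Set.ofList ["tootsie roll", "candy corn"])]

def sort_candy_alt (candy_list : List String) : List (String × List String) :=
  pvCategories.map (fun p => (p.1, candy_list.filter (fun c => p.2.contains c)))

-- ===== PRECONDITION & SPEC =====
def Spec_sort_candy (candy_list : List String) (out : List (String × List String)) : Prop := out = sort_candy_alt candy_list
instance (candy_list : List String) (out : List (String × List String)) : Decidable (Spec_sort_candy candy_list out) := by unfold Spec_sort_candy; infer_instance

-- ===== CLAIM (what is proved, stated in full; the proofs are below) =====
def Claim_equal_sort_candy : Prop := ∀ (candy_list : List String), Dom_sort_candy candy_list → Spec_sort_candy candy_list (sort_candy candy_list)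

-- ===== LEMMAS AND PROOFS =====

theorem pvBeqDecide (a b : String) : (a == b) = decide (a = b) := by
  by_cases h : a = b <;> simp_all

theorem pvModC (a b c : List String) (f : List String → List String) :
    (PySem.Dict.mk [("chocolate", a), ("fruit", b), ("other", c)]).modify "chocolate" [] f
    = PySem.Dict.mk [("chocolate", f a), ("fruit", b), ("other", c)] := by
  simp [PySem.Dict.modify, PySem.Dict.insert, PySem.Dict.getD, PySem.Dict.get?, PySem.Dict.contains]

theorem pvModF (a b c : List String) (f : List String → List String) :
    (PySem.Dict.mk [("chocolate", a), ("fruit", b), ("other", c)]).modify "fruit" [] f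
    = PySem.Dict.mk [("chocolate", a), ("fruit", f b), ("other", c)] := by
  simp [PySem.Dict.modify, PySem.Dict.insert, PySem.Dict.getD, PySem.Dict.get?, PySem.Dict.contains]

theorem pvModO (a b c : List String) (f : List String → List String) :
    (PySem.Dict.mk [("chocolate", a), ("fruit", b), ("other", c)]).modify "other" [] f
    = PySem.Dict.mk [("chocolate", a), ("fruit", b), ("other", f c)] := by
  simp [PySem.Dict.modify, PySem.Dict.insert, PySem.Dict.getD, PySem.Dict.get?, PySem.Dict.contains]

theorem sort_candy_loop (l : List String) (a b c : List String) :
    (l.foldl (fun d candy =>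
      let d := if candy == "hershey bar" then d.modify "chocolate" [] (· ++ [candy]) else d
      let d := if candy == "snickers" then d.modify "chocolate" [] (· ++ [candy]) else d
      let d := if candy == "skittles" then d.modify "fruit" [] (· ++ [candy]) else d
      let d := if candy == "starburst" then d.modify "fruit" [] (· ++ [candy]) else d
      let d := if candy == "tootsie roll" then d.modify "other" [] (· ++ [candy]) else d
      let d := if candy == "candy corn" then d.modify "other" [] (· ++ [candy]) else d
      d) (PySem.Dict.mk [("chocolate", a), ("fruit", b), ("other", c)])).items
    = [("chocolate", a ++ l.filter (fun s => s == "hershey bar" || s == "snickers")),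
       ("fruit", b ++ l.filter (fun s => s == "skittles" || s == "starburst")),
       ("other", c ++ l.filter (fun s => s == "tootsie roll" || s == "candy corn"))] := by
  induction l generalizing a b c with
  | nil => simp [List.filter]
  | cons x xs ih =>
    simp only [List.foldl_cons, List.filter_cons]
    by_cases h1 : x = "hershey bar"
    · simp_all [pvModC]
    by_cases h2 : x = "snickers"
    · simp_all [pvModC]
    by_cases h3 : x = "skittles"
    · simp_all [pvModF]
    by_cases h4 : x = "starburst"
    · simp_all [pvModF]
    by_cases h5 : x = "tootsie roll"
    · simp_all [pvModO]
    by_cases h6 : x = "candy corn"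
    · simp_all [pvModO]
    simp_all

-- ===== VERDICT (by name: the statement is the Claim_ definition above) =====
theorem sort_candy_spec : Claim_equal_sort_candy := by
  intro l _
  show sort_candy l = sort_candy_alt l
  unfold sort_candy sort_candy_alt pvCategories
  simp only []
  rw [show ((PySem.Dict.empty.insert "chocolate" ([] : List String)).insert "fruit" []).insert "other" []
      = PySem.Dict.mk [("chocolate", []), ("fruit", []), ("other", [])] from by decide]
  rw [sort_candy_loop]
  simp only [PySem.Set.contains, PySem.Set.ofList, List.nil_append, Prod.mk.injEq,
    List.map_cons, List.map_nil, List.cons.injEq, and_true, true_and]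
  refine ⟨List.filter_congr ?_, List.filter_congr ?_, List.filter_congr ?_⟩ <;>
    intro x _ <;> simp [pvBeqDecide]
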